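-- pv_equiv track=rewrite | github.com/BreadQuokka/cococoding | 프로그래머스/0/120812. 최빈값 구하기/최빈값 구하기.py | solution
-- ===== SOURCE A (Python) =====
-- def solution(array):
--     S=list(set(array)) # [1,2,3,4]
--     box=[]
--     for i in S:
--         c= array.count(i)
--         box.append(c)
--
--     if box.count(max(box))>=2:#[1,1,3,1]
--         return -1
--     else:
--         freq_index= box.index(max(box))
--         ans= S[freq_index]
--         return ans
-- ===== SOURCE B (Python) =====
-- def solution(array):
--     counts = {}
--     for x in array:
--         counts[x] = counts.get(x, 0) + 1
--     m = max(counts.values())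
--     winners = [v for v, c in counts.items() if c == m]
--     return winners[0] if len(winners) == 1 else -1
-- ===== Notes on version B (the rewrite author's own statement) =====
-- stated objective: faster
-- what changed: B builds a frequency dict in one pass and picks the unique key with maximal count, replacing A's set plus a repeated array.count scan per distinct value.
import Mathlib
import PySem

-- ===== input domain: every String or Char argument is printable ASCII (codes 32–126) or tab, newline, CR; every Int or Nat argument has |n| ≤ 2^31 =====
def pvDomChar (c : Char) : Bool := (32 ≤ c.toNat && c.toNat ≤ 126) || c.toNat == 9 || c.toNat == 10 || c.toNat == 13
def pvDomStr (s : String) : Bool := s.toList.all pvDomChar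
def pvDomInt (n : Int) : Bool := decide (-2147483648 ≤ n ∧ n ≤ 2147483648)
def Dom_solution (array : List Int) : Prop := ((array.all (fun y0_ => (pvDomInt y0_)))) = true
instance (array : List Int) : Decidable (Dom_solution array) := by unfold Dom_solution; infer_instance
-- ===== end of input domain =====

-- B replaces A's set + per-distinct-value array.count scans by one counting pass over a dict (faster; asymptotic, O(n·d) → O(n)).

-- ===== PORT A =====
def solution (array : List Int) : Int :=
  -- S = list(set(array)); the result does not depend on Python's set iteration order
  -- (a unique maximal count determines the answer), so Set.ofList order is exact.
  let S : List Int := PySem.Set.ofList array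
  let box : List Int := S.foldl (fun b i => b ++ [((PySem.List.count array i : Nat) : Int)]) []
  match PySem.List.max? box (fun y => y) with
  | none => 0  -- max([]) raises ValueError; excluded by Pre_solution
  | some m =>
    if PySem.List.count box m ≥ 2 then -1
    else
      match PySem.List.index? box m with
      | none => 0  -- unreachable: m ∈ box
      | some fi => PySem.List.pyGetD S (fi : Int) 0  -- S[freq_index]; exact: 0 ≤ fi < len S

-- ===== PORT B =====
def solution_alt (array : List Int) : Int :=
  let counts : PySem.Dict Int Int :=
    array.foldl (fun d x => d.insert x (d.getD x 0 + 1)) PySem.Dict.empty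
  match PySem.List.max? (PySem.Dict.values counts) (fun y => y) with
  | none => 0  -- max() on empty raises ValueError; excluded by Pre_solution
  | some m =>
    let winners : List Int := (counts.items.filter (fun p => p.2 == m)).map Prod.fst
    if winners.length = 1 then PySem.List.pyGetD winners 0 0 else -1

-- ===== PRECONDITION & SPEC =====
-- Both Pythons raise ValueError (max of an empty sequence) on the empty list; Pre_ excludes exactly that.
def Pre_solution (array : List Int) : Prop := array ≠ []
instance (array : List Int) : Decidable (Pre_solution array) := by unfold Pre_solution; infer_instance
def pvWitness_solution : List Int := ([1, 2, 2])
def Spec_solution (array : List Int) (out : Int) : Prop := out = solution_alt array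
instance (array : List Int) (out : Int) : Decidable (Spec_solution array out) := by unfold Spec_solution; infer_instance

-- ===== CLAIM (what is proved, stated in full; the proofs are below) =====
def Claim_equal_solution : Prop := ∀ (array : List Int), Dom_solution array → Pre_solution array → Spec_solution array (solution array)

-- ===== LEMMAS AND PROOFS =====

-- If m first occurs in (S.map f) at index j, then the first element of S whose image is m is S[j].
theorem head_filter_of_index? {f : Int → Int} {m : Int} :
    ∀ (S : List Int) (j : Nat), PySem.List.index? (S.map f) m = some j →
      (S.filter (fun k => f k == m)).headD 0 = S.getD j 0 := by
  intro S
  induction S with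
  | nil => intro j h; simp [PySem.List.index?_eq_idxOf?] at h
  | cons x t ih =>
    intro j h
    by_cases hx : f x = m
    · rw [List.map_cons, hx, PySem.List.index?_cons_self] at h
      cases h
      simp [hx]
    · rw [List.map_cons, PySem.List.index?_cons_of_ne (t.map f) hx] at h
      cases hj : PySem.List.index? (t.map f) m with
      | none => rw [hj] at h; simp at h
      | some j' =>
        rw [hj] at h
        simp at h
        subst h
        simp only [List.filter_cons, beq_iff_eq, if_neg hx]
        simpa using ih j' hj

theorem solution_eq_alt : ∀ (array : List Int), array ≠ [] → solution array = solution_alt array := by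
  intro array _
  unfold solution solution_alt
  rw [PySem.Dict.foldl_insert_getD_add_one_eq_counter]
  have hbox : List.foldl (fun b i => b ++ [((PySem.List.count array i : Nat) : Int)])
      ([] : List Int) (PySem.Set.ofList array) =
      (PySem.Set.ofList array).map (fun i => ((PySem.List.count array i : Nat) : Int)) := by
    simpa using PySem.List.foldl_append_singleton_eq_map
      (fun i => ((PySem.List.count array i : Nat) : Int)) (PySem.Set.ofList array) []
  have hvals : PySem.Dict.values (PySem.Dict.counter array) =
      (PySem.Set.ofList array).map (fun i => ((PySem.List.count array i : Nat) : Int)) := by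
    show ((PySem.Dict.counter array).items.map Prod.snd) = _
    rw [PySem.Dict.items_counter, List.map_map]
    simp [Function.comp_def, PySem.List.count_eq]
  simp only [hbox, hvals]
  cases hm : PySem.List.max?
      ((PySem.Set.ofList array).map (fun i => ((PySem.List.count array i : Nat) : Int)))
      (fun y => y) with
  | none => rfl
  | some m =>
    dsimp only
    have hmem : m ∈ (PySem.Set.ofList array).map (fun i => ((PySem.List.count array i : Nat) : Int)) :=
      PySem.List.max?_mem hm
    have hwin : ((PySem.Dict.counter array).items.filter (fun p => p.2 == m)).map Prod.fst =
        (PySem.Set.ofList array).filter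
          (fun k => ((PySem.List.count array k : Nat) : Int) == m) := by
      rw [PySem.Dict.items_counter, List.filter_map, List.map_map]
      simp [Function.comp_def, PySem.List.count_eq]
    have hcount : ((PySem.Set.ofList array).map
          (fun i => ((PySem.List.count array i : Nat) : Int))).count m =
        ((PySem.Set.ofList array).filter
          (fun k => ((PySem.List.count array k : Nat) : Int) == m)).length := by
      rw [List.count, List.countP_map, List.countP_eq_length_filter]
      rfl
    rw [hwin]
    by_cases h2 : PySem.List.count
        ((PySem.Set.ofList array).map (fun i => ((PySem.List.count array i : Nat) : Int))) m ≥ 2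
    · have hne : ((PySem.Set.ofList array).filter
          (fun k => ((PySem.List.count array k : Nat) : Int) == m)).length ≠ 1 := by
        rw [PySem.List.count_eq] at h2
        rw [← hcount]
        omega
      simp only [PySem.List.count_eq] at h2 hne
      simp [PySem.List.count_eq, h2, hne]
    · have h1 : ((PySem.Set.ofList array).map
          (fun i => ((PySem.List.count array i : Nat) : Int))).count m = 1 := by
        have hpos := List.one_le_count_iff.mpr hmem
        rw [PySem.List.count_eq] at h2
        omega
      have hlen : ((PySem.Set.ofList array).filter
          (fun k => ((PySem.List.count array k : Nat) : Int) == m)).length = 1 := by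
        rw [← hcount]; exact h1
      rw [if_neg h2, if_pos hlen]
      rcases Option.isSome_iff_exists.mp ((PySem.List.index?_isSome_iff _ _).mpr hmem) with ⟨j, hj⟩
      rw [hj]
      dsimp only
      have hhd := head_filter_of_index? (PySem.Set.ofList array) j hj
      rw [PySem.List.pyGetD_natCast, PySem.List.pyGetD_ofNat']
      rw [← hhd]
      cases ((PySem.Set.ofList array).filter
          (fun k => ((PySem.List.count array k : Nat) : Int) == m)) <;> simp

-- ===== VERDICT (by name: the statement is the Claim_ definition above) =====
theorem solution_spec : Claim_equal_solution := by
  intro array _ hpre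
  unfold Spec_solution
  exact solution_eq_alt array hpre
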